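-- pv_equiv track=rewrite | github.com/cry999/AtCoder | beginner/072/C.py | together
-- ===== SOURCE A (Python) =====
-- def together(N: int, A: list)->int:
--     d = {}
--     for a in A:
--         d.setdefault(a, 0)
--         d[a] += 1
--
--         d.setdefault(a+1, 0)
--         d[a+1] += 1
--
--         d.setdefault(a-1, 0)
--         d[a-1] += 1
--
--     return max(d.values())
-- ===== SOURCE B (Python) =====
-- def together(N: int, A: list) -> int:
--     # count table: one bucket per value actually in A
--     c = {}
--     for a in A:
--         c[a] = c.get(a, 0) + 1
--     # gather: max of 3-wide window sums over candidate centers v-1, v, v+1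
--     best = None
--     for v in c:
--         for k in (v - 1, v, v + 1):
--             s = c.get(k - 1, 0) + c.get(k, 0) + c.get(k + 1, 0)
--             if best is None or s > best:
--                 best = s
--     return best
-- ===== Notes on version B (the rewrite author's own statement) =====
-- stated objective: alternative
-- what changed: Instead of scattering +1 into three dict buckets per element and maxing the dict values, B builds a plain Counter of A once and then takes the max of 3-wide window sums c[k-1]+c[k]+c[k+1] over candidate centers v-1,v,v+1 for each distinct v.
import Mathlib
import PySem

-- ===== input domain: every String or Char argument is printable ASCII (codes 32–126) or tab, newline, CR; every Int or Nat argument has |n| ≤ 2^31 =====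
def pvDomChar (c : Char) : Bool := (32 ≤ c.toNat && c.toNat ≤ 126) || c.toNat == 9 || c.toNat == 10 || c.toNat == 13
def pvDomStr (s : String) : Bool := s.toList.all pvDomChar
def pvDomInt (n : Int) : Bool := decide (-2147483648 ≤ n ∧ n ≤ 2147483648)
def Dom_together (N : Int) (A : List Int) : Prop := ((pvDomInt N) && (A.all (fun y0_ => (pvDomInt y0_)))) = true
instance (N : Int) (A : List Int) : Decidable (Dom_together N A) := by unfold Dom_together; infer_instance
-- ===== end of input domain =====

-- B replaces A's per-element scatter of +1 into three dict buckets by a single count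
-- table plus a max of 3-wide window sums over candidate centers (alternative decomposition).

-- ===== PORT A =====
def together (N : Int) (A : List Int) : Int :=
  let d := A.foldl (fun d a =>
    let d := d.setdefault a 0
    let d := d.insert a (d.getD a 0 + 1)
    let d := d.setdefault (a + 1) 0
    let d := d.insert (a + 1) (d.getD (a + 1) 0 + 1)
    let d := d.setdefault (a - 1) 0
    let d := d.insert (a - 1) (d.getD (a - 1) 0 + 1)
    d) (PySem.Dict.empty : PySem.Dict Int Int)
  match PySem.List.max? d.values (fun x => x) with
  | some m => m
  | none => 0   -- unreachable under Pre_together (Python raises ValueError on empty A)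

-- ===== PORT B =====
def together_alt (N : Int) (A : List Int) : Int :=
  let c := A.foldl (fun d x => d.insert x (d.getD x 0 + 1)) (PySem.Dict.empty : PySem.Dict Int Int)
  let best := c.keys.foldl (fun best v =>
    [v - 1, v, v + 1].foldl (fun best k =>
      let s := c.getD (k - 1) 0 + c.getD k 0 + c.getD (k + 1) 0
      match best with
      | none => some s
      | some b => if s > b then some s else some b) best) none
  match best with
  | some b => b
  | none => 0   -- unreachable under Pre_together

-- ===== PRECONDITION & SPEC =====
-- Python A raises ValueError (max over an empty dict) exactly when A = []; only that is excluded.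
def Pre_together (N : Int) (A : List Int) : Prop := A ≠ []
instance (N : Int) (A : List Int) : Decidable (Pre_together N A) := by unfold Pre_together; infer_instance
def pvWitness_together : Int × List Int := (3, [1, 2, 2])

def Spec_together (N : Int) (A : List Int) (out : Int) : Prop := out = together_alt N A
instance (N : Int) (A : List Int) (out : Int) : Decidable (Spec_together N A out) := by unfold Spec_together; infer_instance

-- ===== CLAIM (what is proved, stated in full; the proofs are below) =====
def Claim_equal_together : Prop := ∀ (N : Int) (A : List Int), Dom_together N A → Pre_together N A → Spec_together N A (together N A)

-- ===== LEMMAS AND PROOFS =====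

-- the 3-wide window sum of counts; both programs maximise this over the same key set
def winSum (A : List Int) (k : Int) : Int :=
  (A.count k : Int) + (A.count (k - 1) : Int) + (A.count (k + 1) : Int)

-- Python's max(xs) as the running-max loop
def lmax : List Int → Int
  | [] => 0
  | x :: t => t.foldl max x

theorem lmax_mem {l : List Int} (h : l ≠ []) : lmax l ∈ l := by
  cases l with
  | nil => exact absurd rfl h
  | cons x t =>
    simp only [lmax]
    rcases PySem.List.foldl_max_mem t x with h1 | h1
    · rw [h1]; exact List.mem_cons_self
    · exact List.mem_cons_of_mem _ h1

theorem lmax_ub {l : List Int} {y : Int} (hy : y ∈ l) : y ≤ lmax l := by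
  cases l with
  | nil => cases hy
  | cons x t =>
    simp only [lmax]
    rcases List.mem_cons.mp hy with rfl | h1
    · exact (PySem.List.le_foldl_max t y).1
    · exact (PySem.List.le_foldl_max t x).2 y h1

theorem lmax_congr {l1 l2 : List Int} (h1 : l1 ≠ []) (h2 : l2 ≠ [])
    (hm : ∀ x, x ∈ l1 ↔ x ∈ l2) : lmax l1 = lmax l2 :=
  le_antisymm (lmax_ub ((hm _).mp (lmax_mem h1))) (lmax_ub ((hm _).mpr (lmax_mem h2)))

-- A's per-element step (definitionally the lambda in the port of A)
def stepA (d : PySem.Dict Int Int) (a : Int) : PySem.Dict Int Int :=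
  let d := d.setdefault a 0
  let d := d.insert a (d.getD a 0 + 1)
  let d := d.setdefault (a + 1) 0
  let d := d.insert (a + 1) (d.getD (a + 1) 0 + 1)
  let d := d.setdefault (a - 1) 0
  let d := d.insert (a - 1) (d.getD (a - 1) 0 + 1)
  d

theorem bump_getD (d : PySem.Dict Int Int) (a k : Int) :
    ((d.setdefault a 0).insert a ((d.setdefault a 0).getD a 0 + 1)).getD k 0
      = d.getD k 0 + (if k = a then 1 else 0) := by
  by_cases h : d.contains a = true
  · rw [PySem.Dict.setdefault_of_contains d 0 h, PySem.Dict.getD_insert]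
    split_ifs with hk
    · subst hk; rfl
    · omega
  · have h' : d.contains a = false := by simpa using h
    rw [PySem.Dict.setdefault_of_not_contains d 0 h']
    rcases eq_or_ne k a with rfl | hk
    · simp [PySem.Dict.getD_of_not_contains _ 0 h']
    · simp [PySem.Dict.getD_insert, hk]

theorem bump_mem (d : PySem.Dict Int Int) (a k : Int) :
    (k ∈ ((d.setdefault a 0).insert a ((d.setdefault a 0).getD a 0 + 1)).keys)
      ↔ (k = a ∨ k ∈ d.keys) := by
  by_cases h : d.contains a = true
  · rw [PySem.Dict.setdefault_of_contains d 0 h, PySem.Dict.mem_keys_insert]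
  · rw [PySem.Dict.setdefault_of_not_contains d 0 (by simpa using h),
        PySem.Dict.mem_keys_insert, PySem.Dict.mem_keys_insert]
    tauto

theorem bump_nodup (d : PySem.Dict Int Int) (a : Int) (h : d.keys.Nodup) :
    ((d.setdefault a 0).insert a ((d.setdefault a 0).getD a 0 + 1)).keys.Nodup := by
  by_cases hc : d.contains a = true
  · rw [PySem.Dict.setdefault_of_contains d 0 hc]
    exact PySem.Dict.nodup_keys_insert _ _ _ h
  · rw [PySem.Dict.setdefault_of_not_contains d 0 (by simpa using hc)]
    exact PySem.Dict.nodup_keys_insert _ _ _ (PySem.Dict.nodup_keys_insert _ _ _ h)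

theorem stepA_getD (d : PySem.Dict Int Int) (a k : Int) :
    (stepA d a).getD k 0 = d.getD k 0 + (if k = a then 1 else 0)
      + (if k = a + 1 then 1 else 0) + (if k = a - 1 then 1 else 0) := by
  simp only [stepA]
  rw [bump_getD, bump_getD, bump_getD]

theorem stepA_mem (d : PySem.Dict Int Int) (a k : Int) :
    k ∈ (stepA d a).keys ↔ (k = a ∨ k = a + 1 ∨ k = a - 1 ∨ k ∈ d.keys) := by
  simp only [stepA]
  rw [bump_mem, bump_mem, bump_mem]
  tauto

theorem stepA_nodup (d : PySem.Dict Int Int) (a : Int) (h : d.keys.Nodup) :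
    (stepA d a).keys.Nodup := by
  simp only [stepA]
  exact bump_nodup _ _ (bump_nodup _ _ (bump_nodup _ _ h))

theorem winSum_cons (a : Int) (t : List Int) (k : Int) :
    winSum (a :: t) k = winSum t k + (if k = a then 1 else 0)
      + (if k = a + 1 then 1 else 0) + (if k = a - 1 then 1 else 0) := by
  simp only [winSum, List.count_cons, beq_iff_eq]
  push_cast
  split_ifs <;> omega

theorem foldA_getD (A : List Int) (d : PySem.Dict Int Int) (k : Int) :
    (A.foldl stepA d).getD k 0 = d.getD k 0 + winSum A k := by
  induction A generalizing d with
  | nil => simp [winSum]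
  | cons a t ih =>
    rw [List.foldl_cons, ih, stepA_getD, winSum_cons]
    ring

theorem foldA_mem (A : List Int) (d : PySem.Dict Int Int) (k : Int) :
    k ∈ (A.foldl stepA d).keys ↔ (k ∈ d.keys ∨ ∃ a ∈ A, k = a ∨ k = a + 1 ∨ k = a - 1) := by
  induction A generalizing d with
  | nil => simp
  | cons a t ih =>
    rw [List.foldl_cons, ih]
    simp only [stepA_mem, List.mem_cons]
    constructor
    · rintro ((hk | hk | hk | hk) | ⟨a', ha', hp⟩)
      · exact Or.inr ⟨a, Or.inl rfl, Or.inl hk⟩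
      · exact Or.inr ⟨a, Or.inl rfl, Or.inr (Or.inl hk)⟩
      · exact Or.inr ⟨a, Or.inl rfl, Or.inr (Or.inr hk)⟩
      · exact Or.inl hk
      · exact Or.inr ⟨a', Or.inr ha', hp⟩
    · rintro (hk | ⟨a', ha' | ha', hp⟩)
      · exact Or.inl (Or.inr (Or.inr (Or.inr hk)))
      · subst ha'
        exact Or.inl (by tauto)
      · exact Or.inr ⟨a', ha', hp⟩

theorem foldA_nodup (A : List Int) (d : PySem.Dict Int Int) (h : d.keys.Nodup) :
    (A.foldl stepA d).keys.Nodup := by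
  induction A generalizing d with
  | nil => simpa
  | cons a t ih => exact ih _ (stepA_nodup _ _ h)

-- B's window sum read off the count table, and B's running-max step (definitionally the port's lambdas)
def sfun (c : PySem.Dict Int Int) (k : Int) : Int :=
  c.getD (k - 1) 0 + c.getD k 0 + c.getD (k + 1) 0

def maxStep (c : PySem.Dict Int Int) (best : Option Int) (k : Int) : Option Int :=
  match best with
  | none => some (sfun c k)
  | some b => if sfun c k > b then some (sfun c k) else some b

theorem sfun_counter (A : List Int) (k : Int) :
    sfun (PySem.Dict.counter A) k = winSum A k := by
  simp only [sfun, winSum, PySem.Dict.getD_counter]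
  ring

theorem foldl_triple (c : PySem.Dict Int Int) (l : List Int) (init : Option Int) :
    l.foldl (fun best v => [v - 1, v, v + 1].foldl (maxStep c) best) init
      = (l.flatMap (fun v => [v - 1, v, v + 1])).foldl (maxStep c) init := by
  induction l generalizing init with
  | nil => rfl
  | cons v t ih =>
    simp only [List.foldl_cons, List.flatMap_cons, List.foldl_append]
    exact ih _

theorem maxStep_some (c : PySem.Dict Int Int) (l : List Int) :
    ∀ b : Int, l.foldl (maxStep c) (some b) = some ((l.map (sfun c)).foldl max b) := by
  induction l with
  | nil => intro b; rfl
  | cons k t ih =>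
    intro b
    rw [List.foldl_cons]
    have hstep : maxStep c (some b) k = some (max b (sfun c k)) := by
      simp only [maxStep]
      by_cases h : sfun c k > b
      · rw [if_pos h, max_eq_right h.le]
      · rw [if_neg h, max_eq_left (not_lt.mp h)]
    rw [hstep, ih]
    simp [List.foldl_cons]

theorem maxStep_none (c : PySem.Dict Int Int) (l : List Int) (h : l ≠ []) :
    l.foldl (maxStep c) none = some (lmax (l.map (sfun c))) := by
  obtain ⟨k, t, rfl⟩ := List.exists_cons_of_ne_nil h
  rw [List.foldl_cons]
  have h1 : maxStep c none k = some (sfun c k) := rfl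
  rw [h1, maxStep_some]
  simp [lmax]

-- ===== VERDICT (by name: the statement is the Claim_ definition above) =====
theorem together_spec : Claim_equal_together := by
  intro N A hdom hpre
  unfold Spec_together
  -- ------ A's side ------
  have hAdef : together N A =
      (match PySem.List.max? ((A.foldl stepA (PySem.Dict.empty : PySem.Dict Int Int)).values)
          (fun x => x) with
       | some m => m
       | none => 0) := rfl
  set dA := A.foldl stepA (PySem.Dict.empty : PySem.Dict Int Int) with hdA
  have hnodup : dA.keys.Nodup := by
    rw [hdA]
    exact foldA_nodup A _ PySem.Dict.nodup_keys_empty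
  have hkeysmem : ∀ k, k ∈ dA.keys ↔ ∃ a ∈ A, k = a ∨ k = a + 1 ∨ k = a - 1 := by
    intro k
    rw [hdA, foldA_mem]
    simp [PySem.Dict.keys_empty]
  have hvals : dA.values = dA.keys.map (winSum A) := by
    rw [PySem.Dict.values_eq_map_keys dA hnodup 0]
    apply List.map_congr_left
    intro k _
    rw [hdA, foldA_getD]
    simp [PySem.Dict.getD_empty]
  obtain ⟨a0, ha0⟩ := List.exists_mem_of_ne_nil A hpre
  have hk0 : a0 ∈ dA.keys := (hkeysmem a0).2 ⟨a0, ha0, Or.inl rfl⟩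
  have hkeysne : dA.keys ≠ [] := List.ne_nil_of_mem hk0
  have hvalsne : dA.values ≠ [] := by
    rw [hvals]
    intro hc
    exact hkeysne (List.map_eq_nil_iff.mp hc)
  obtain ⟨x, t, hxt⟩ := List.exists_cons_of_ne_nil hvalsne
  have hAval : together N A = lmax dA.values := by
    rw [hAdef, hxt, PySem.List.max?_id_cons]
    simp [lmax]
  -- ------ B's side ------
  have hBdef : together_alt N A =
      (match (PySem.Dict.counter A).keys.foldl
          (fun best v => [v - 1, v, v + 1].foldl (maxStep (PySem.Dict.counter A)) best) none with
       | some b => b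
       | none => 0) := rfl
  set K2 := (PySem.Dict.counter A).keys.flatMap (fun v => [v - 1, v, v + 1]) with hK2
  have hK2mem : ∀ k, k ∈ K2 ↔ ∃ a ∈ A, k = a - 1 ∨ k = a ∨ k = a + 1 := by
    intro k
    rw [hK2]
    simp [List.mem_flatMap, PySem.Dict.keys_counter, PySem.Set.mem_ofList]
  have hK2ne : K2 ≠ [] := by
    apply List.ne_nil_of_mem ((hK2mem a0).2 ⟨a0, ha0, Or.inr (Or.inl rfl)⟩)
  have hBval : together_alt N A = lmax (K2.map (winSum A)) := by
    rw [hBdef, foldl_triple, ← hK2, maxStep_none _ _ hK2ne]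
    have hmc : K2.map (sfun (PySem.Dict.counter A)) = K2.map (winSum A) :=
      List.map_congr_left (fun k _ => sfun_counter A k)
    rw [hmc]
  -- ------ the two maxima agree ------
  rw [hAval, hBval, hvals]
  apply lmax_congr
  · intro hc
    exact hkeysne (List.map_eq_nil_iff.mp hc)
  · intro hc
    exact hK2ne (List.map_eq_nil_iff.mp hc)
  · intro y
    simp only [List.mem_map]
    constructor
    · rintro ⟨k, hk, rfl⟩
      obtain ⟨a, ha, hrel⟩ := (hkeysmem k).mp hk
      exact ⟨k, (hK2mem k).2 ⟨a, ha, by omega⟩, rfl⟩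
    · rintro ⟨k, hk, rfl⟩
      obtain ⟨a, ha, hrel⟩ := (hK2mem k).mp hk
      exact ⟨k, (hkeysmem k).2 ⟨a, ha, by omega⟩, rfl⟩
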